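-- pv_equiv track=rewrite | github.com/PinKing141/Detective-RPG-Simulator | src/noir/tools/sweep_case_quality.py | triage_candidates
-- ===== SOURCE A (Python) =====
-- def triage_candidates(results: list[dict[str, object]], limit: int = 10) -> list[dict[str, object]]:
--     if limit <= 0:
--         return []
--     shaky = [result for result in results if result["tier"] == "shaky"]
--     if len(shaky) >= limit:
--         return shaky[:limit]
--     failed = [result for result in results if result["tier"] == "failed"]
--     return shaky + failed[: max(0, limit - len(shaky))]
-- ===== SOURCE B (Python) =====
-- def triage_candidates(results: list[dict[str, object]], limit: int = 10) -> list[dict[str, object]]: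
--     if limit <= 0:
--         return []
--     rank = {"shaky": 0, "failed": 1}
--     candidates = [result for result in results if result["tier"] in rank]
--     candidates.sort(key=lambda result: rank[result["tier"]])
--     return candidates[:limit]
-- ===== Notes on version B (the rewrite author's own statement) =====
-- stated objective: idiomatic
-- what changed: One filtered pass collects shaky/failed results, a stable sort by tier priority (shaky before failed) replaces the two separate comprehensions and the length case-split, and a single slice applies the limit.
import Mathlib
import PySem

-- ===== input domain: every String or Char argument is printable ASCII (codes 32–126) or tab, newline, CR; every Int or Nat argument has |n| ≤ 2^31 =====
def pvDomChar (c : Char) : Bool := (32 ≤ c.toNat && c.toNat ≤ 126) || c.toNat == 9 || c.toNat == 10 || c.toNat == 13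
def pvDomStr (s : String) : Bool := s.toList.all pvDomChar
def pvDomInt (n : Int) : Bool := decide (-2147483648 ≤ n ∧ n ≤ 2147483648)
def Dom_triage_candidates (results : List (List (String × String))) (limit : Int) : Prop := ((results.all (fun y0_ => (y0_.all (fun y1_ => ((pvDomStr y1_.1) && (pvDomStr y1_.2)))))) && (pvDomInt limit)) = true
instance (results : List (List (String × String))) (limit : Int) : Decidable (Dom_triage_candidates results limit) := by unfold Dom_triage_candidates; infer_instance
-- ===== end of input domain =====

-- B replaces A's two tier-specific comprehensions and length case-split by one filtered pass,
-- a stable sort on a tier-priority key, and a single slice (more idiomatic; same results).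


-- shared model of the Python dict value: result["tier"] (dict built from the pairs, later
-- duplicates overwrite, exactly like dict(pairs)); none = KeyError
def pvTier (r : List (String × String)) : Option String :=
  (r.foldl (fun d p => d.insert p.1 p.2) PySem.Dict.empty).get? "tier"

-- ===== PORT A =====
def triage_candidates (results : List (List (String × String))) (limit : Int) : List (List (String × String)) :=
  if limit ≤ 0 then []
  else
    let shaky := results.filter (fun r => pvTier r == some "shaky")
    if limit ≤ (shaky.length : Int) then PySem.List.slice shaky none (some limit)
    else
      let failed := results.filter (fun r => pvTier r == some "failed")
      shaky ++ PySem.List.slice failed none (some (max 0 (limit - shaky.length)))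

-- ===== PORT B =====
def pvRank : PySem.Dict String Int := PySem.Dict.mk [("shaky", 0), ("failed", 1)]

-- key lambda of Source B: rank[result["tier"]]; total stand-in defaults are never reached on the
-- candidates list (every candidate's tier is a key of pvRank)
def pvKey (r : List (String × String)) : Int := pvRank.getD ((pvTier r).getD "") 0

def triage_candidates_alt (results : List (List (String × String))) (limit : Int) : List (List (String × String)) :=
  if limit ≤ 0 then []
  else
    let candidates := results.filter (fun r =>
      match pvTier r with
      | some t => pvRank.contains t
      | none => false)
    PySem.List.slice (PySem.List.sorted candidates pvKey false) none (some limit)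

-- ===== PRECONDITION & SPEC =====
-- Pre_ excludes exactly the inputs where Python A raises KeyError: limit > 0 and some result
-- lacks a "tier" key (B raises there too).
def Pre_triage_candidates (results : List (List (String × String))) (limit : Int) : Prop :=
  limit ≤ 0 ∨ ∀ r ∈ results, (pvTier r).isSome = true
instance (results : List (List (String × String))) (limit : Int) : Decidable (Pre_triage_candidates results limit) := by unfold Pre_triage_candidates; infer_instance

def pvWitness_triage_candidates : (List (List (String × String))) × Int :=
  ([[("tier", "failed")], [("tier", "shaky")], [("tier", "ok")]], 2)

def Spec_triage_candidates (results : List (List (String × String))) (limit : Int) (out : List (List (String × String))) : Prop := out = triage_candidates_alt results limit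
instance (results : List (List (String × String))) (limit : Int) (out : List (List (String × String))) : Decidable (Spec_triage_candidates results limit out) := by unfold Spec_triage_candidates; infer_instance

-- ===== CLAIM (what is proved, stated in full; the proofs are below) =====
def Claim_equal_triage_candidates : Prop := ∀ (results : List (List (String × String))) (limit : Int), Dom_triage_candidates results limit → Pre_triage_candidates results limit → Spec_triage_candidates results limit (triage_candidates results limit)

-- ===== LEMMAS AND PROOFS =====

theorem insertBy_append_of_forall_not {α : Type} (before : α → α → Bool) (x : α)
    (z o : List α) (hz : ∀ y ∈ z, before x y = false) :
    PySem.List.insertBy before x (z ++ o) = z ++ PySem.List.insertBy before x o := by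
  induction z with
  | nil => simp
  | cons a z ih =>
    simp only [List.cons_append, PySem.List.insertBy, hz a (by simp)]
    simp [ih (fun y hy => hz y (by simp [hy]))]

theorem insertBy_cons_of_before {α : Type} (before : α → α → Bool) (x : α)
    (o : List α) (ho : ∀ y ∈ o, before x y = true) :
    PySem.List.insertBy before x o = x :: o := by
  cases o with
  | nil => rfl
  | cons y ys => simp [PySem.List.insertBy, ho y (by simp)]

theorem foldl_insertBy_binary {α : Type} (key : α → Int) (xs z o : List α)
    (hz : ∀ y ∈ z, key y = 0) (ho : ∀ y ∈ o, key y = 1)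
    (h : ∀ x ∈ xs, key x = 0 ∨ key x = 1) :
    xs.foldl (fun acc x => PySem.List.insertBy (fun a b => decide (key a < key b)) x acc) (z ++ o)
      = (z ++ xs.filter (fun x => key x == 0)) ++ (o ++ xs.filter (fun x => key x == 1)) := by
  induction xs generalizing z o with
  | nil => simp
  | cons x xs ih =>
    rcases h x (by simp) with hx | hx
    · have step : PySem.List.insertBy (fun a b => decide (key a < key b)) x (z ++ o)
          = (z ++ [x]) ++ o := by
        rw [insertBy_append_of_forall_not _ _ _ _
          (fun y hy => by simp [hx, hz y hy]),
          insertBy_cons_of_before _ _ _ (fun y hy => by simp [hx, ho y hy])]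
        simp
      simp only [List.foldl_cons, step]
      rw [ih (z ++ [x]) o
        (by intro y hy; rcases List.mem_append.1 hy with h' | h'
            · exact hz y h'
            · simp at h'; subst h'; exact hx)
        ho (fun y hy => h y (by simp [hy]))]
      simp [hx]
    · have step : PySem.List.insertBy (fun a b => decide (key a < key b)) x (z ++ o)
          = z ++ (o ++ [x]) := by
        rw [PySem.List.insertBy_of_forall_not_before _ _ _
          (by intro y hy; rcases List.mem_append.1 hy with h' | h'
              · simp [hx, hz y h']
              · simp [hx, ho y h'])]
        simp
      simp only [List.foldl_cons, step]
      rw [ih z (o ++ [x]) hz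
        (by intro y hy; rcases List.mem_append.1 hy with h' | h'
            · exact ho y h'
            · simp at h'; subst h'; exact hx)
        (fun y hy => h y (by simp [hy]))]
      simp [hx]

theorem sorted_binary {α : Type} (key : α → Int) (xs : List α)
    (h : ∀ x ∈ xs, key x = 0 ∨ key x = 1) :
    PySem.List.sorted xs key false
      = xs.filter (fun x => key x == 0) ++ xs.filter (fun x => key x == 1) := by
  have := foldl_insertBy_binary key xs [] [] (by simp) (by simp) h
  simpa [PySem.List.sorted_eq_foldl_insertBy] using this

theorem triage_candidates_spec : Claim_equal_triage_candidates := by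
  intro results limit _hdom hpre
  unfold Spec_triage_candidates triage_candidates triage_candidates_alt
  by_cases hlim : limit ≤ 0
  · simp [hlim]
  · simp only [hlim, if_false]
    rcases hpre with h | htier
    · exact absurd h hlim
    -- names
    set p : List (String × String) → Bool := fun r =>
      match pvTier r with
      | some t => pvRank.contains t
      | none => false with hp
    have hkey : ∀ r ∈ results.filter p, pvKey r = 0 ∨ pvKey r = 1 := by
      intro r hr
      have hmem := List.mem_filter.1 hr
      rcases ht : pvTier r with _ | t
      · rw [hp] at hmem; simp [ht] at hmem
      · have hc : pvRank.contains t = true := by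
          have := hmem.2; rw [hp] at this; simpa [ht] using this
        simp only [pvRank, PySem.Dict.contains_mk, List.any_cons, List.any_nil] at hc
        unfold pvKey
        have hts : "shaky" = t ∨ "failed" = t := by simpa using hc
        rcases hts with h' | h'
        · left; rw [ht, ← h']; decide
        · right; rw [ht, ← h']; decide
    rw [sorted_binary pvKey _ hkey]
    -- the two filtered halves are A's comprehensions
    have h0 : (results.filter p).filter (fun r => pvKey r == 0)
        = results.filter (fun r => pvTier r == some "shaky") := by
      rw [List.filter_filter]
      apply List.filter_congr
      intro r hr
      obtain ⟨t, ht⟩ := Option.isSome_iff_exists.1 (htier r hr)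
      by_cases hs : t = "shaky"
      · subst hs; simp only [hp, pvKey, ht]; decide
      · by_cases hf : t = "failed"
        · subst hf; simp only [hp, pvKey, ht]; decide
        · have e1 : (("shaky" : String) == t) = false :=
            beq_eq_false_iff_ne.2 (fun h => hs h.symm)
          have e2 : (("failed" : String) == t) = false :=
            beq_eq_false_iff_ne.2 (fun h => hf h.symm)
          have e3 : ((t : String) == "shaky") = false := beq_eq_false_iff_ne.2 hs
          simp [hp, ht, pvKey, pvRank, PySem.Dict.contains_mk, e1, e2, e3]
    have h1 : (results.filter p).filter (fun r => pvKey r == 1)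
        = results.filter (fun r => pvTier r == some "failed") := by
      rw [List.filter_filter]
      apply List.filter_congr
      intro r hr
      obtain ⟨t, ht⟩ := Option.isSome_iff_exists.1 (htier r hr)
      by_cases hs : t = "shaky"
      · subst hs; simp only [hp, pvKey, ht]; decide
      · by_cases hf : t = "failed"
        · subst hf; simp only [hp, pvKey, ht]; decide
        · have e1 : (("shaky" : String) == t) = false :=
            beq_eq_false_iff_ne.2 (fun h => hs h.symm)
          have e2 : (("failed" : String) == t) = false :=
            beq_eq_false_iff_ne.2 (fun h => hf h.symm)
          have e3 : ((t : String) == "failed") = false := beq_eq_false_iff_ne.2 hf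
          simp [hp, ht, pvKey, pvRank, PySem.Dict.contains_mk, e1, e2, e3]
    rw [h0, h1]
    set shaky := results.filter (fun r => pvTier r == some "shaky") with hsh
    set failed := results.filter (fun r => pvTier r == some "failed") with hfl
    have hl0 : 0 ≤ limit := le_of_lt (lt_of_not_ge hlim)
    rw [PySem.List.slice_to _ hl0]
    by_cases hge : limit ≤ (shaky.length : Int)
    · simp only [hge, if_true]
      rw [PySem.List.slice_to _ hl0]
      exact (List.take_append_of_le_length (by omega : limit.toNat ≤ shaky.length)).symm
    · simp only [hge, if_false]
      have hlt : (shaky.length : Int) < limit := lt_of_not_ge hge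
      have hmax : max 0 (limit - (shaky.length : Int)) = limit - shaky.length := by omega
      rw [hmax, PySem.List.slice_to _ (by omega)]
      rw [PySem.List.slice_to _ hl0, List.take_append]
      congr 1
      · exact (List.take_of_length_le (by omega)).symm
      · congr 1; omega
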